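-- pv_equiv track=rewrite | github.com/briancmurphy87/leetcode_exercises | recursion/backtracking/n_queens.py | get_attack_zones_up_and_right
-- ===== SOURCE A (Python) =====
-- def get_attack_zones_up_and_right(n: int, row: int, col: int) -> list[tuple[int, int]]:
--     out: list[tuple[int, int]] = []
--
--     next_row = row - 1
--     next_col = col + 1
--     while next_row >= 0 and next_col < n:
--         out.append((next_row, next_col))
--         next_row -= 1
--         next_col += 1
--     return out
-- ===== SOURCE B (Python) =====
-- def get_attack_zones_up_and_right(n: int, row: int, col: int) -> list[tuple[int, int]]:
--     # Cells on the up-right diagonal all satisfy r + c == row + col; the row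
--     # coordinate ranges from max(0, row+col-n+1) up to row-1.  Build the cells
--     # in ascending-row order from that lower bound, then reverse to get the
--     # near-to-far order.
--     s = row + col
--     lo = max(0, s - n + 1)
--     return [(r, s - r) for r in range(lo, row)][::-1]
-- ===== Notes on version B (the rewrite author's own statement) =====
-- stated objective: alternative
-- what changed: characterizes the diagonal as the level set r+c = row+col, computes the row coordinate's lower bound in closed form, builds the cells in the opposite (ascending-row, far-to-near) order and reverses, instead of A's forward two-counter bounds-tested walk
import Mathlib
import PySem

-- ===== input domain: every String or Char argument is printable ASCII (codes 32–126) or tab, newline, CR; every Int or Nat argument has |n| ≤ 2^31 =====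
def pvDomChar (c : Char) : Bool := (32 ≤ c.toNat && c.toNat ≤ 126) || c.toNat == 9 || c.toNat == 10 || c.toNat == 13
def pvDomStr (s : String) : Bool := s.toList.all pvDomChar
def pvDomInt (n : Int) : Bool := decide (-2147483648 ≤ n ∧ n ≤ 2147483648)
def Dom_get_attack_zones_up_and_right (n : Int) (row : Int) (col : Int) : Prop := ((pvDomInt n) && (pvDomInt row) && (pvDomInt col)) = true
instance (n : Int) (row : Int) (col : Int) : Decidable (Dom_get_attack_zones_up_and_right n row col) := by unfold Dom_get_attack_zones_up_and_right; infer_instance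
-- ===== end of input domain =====

-- B characterizes the diagonal as the level set r + c = row + col, computes the row
-- coordinate's lower bound in closed form, builds the cells far-to-near and reverses,
-- instead of A's forward two-counter bounds-tested walk.


-- ===== PORT A =====
-- the while loop of A: state (next_row, next_col), appending while in bounds
def pvLoopA (n r c : Int) : List (Int × Int) :=
  if h : 0 ≤ r ∧ c < n then (r, c) :: pvLoopA n (r - 1) (c + 1) else []
termination_by (r + 1).toNat
decreasing_by omega

def get_attack_zones_up_and_right (n : Int) (row : Int) (col : Int) : List (Int × Int) :=
  pvLoopA n (row - 1) (col + 1)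

-- ===== PORT B =====
def get_attack_zones_up_and_right_alt (n : Int) (row : Int) (col : Int) : List (Int × Int) :=
  let s := row + col
  let lo := max 0 (s - n + 1)
  (((PySem.List.pyRange lo row 1).map (fun r => (r, s - r))).reverse)  -- [::-1] on a full list is reverse

-- ===== PRECONDITION & SPEC =====
def Spec_get_attack_zones_up_and_right (n : Int) (row : Int) (col : Int) (out : List (Int × Int)) : Prop := out = get_attack_zones_up_and_right_alt n row col
instance (n : Int) (row : Int) (col : Int) (out : List (Int × Int)) : Decidable (Spec_get_attack_zones_up_and_right n row col out) := by unfold Spec_get_attack_zones_up_and_right; infer_instance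

-- ===== CLAIM =====
def Claim_equal_get_attack_zones_up_and_right : Prop := ∀ (n : Int) (row : Int) (col : Int), Dom_get_attack_zones_up_and_right n row col → Spec_get_attack_zones_up_and_right n row col (get_attack_zones_up_and_right n row col)

-- ===== LEMMAS AND PROOFS =====

theorem pvLoopA_eq_range (n : Int) : ∀ (m : ℕ) (r c : Int), (min (r + 1) (n - c)).toNat = m →
    pvLoopA n r c = (List.range m).map (fun (k : ℕ) => (r - (k : Int), c + (k : Int))) := by
  intro m
  induction m with
  | zero =>
    intro r c hm
    rw [pvLoopA, dif_neg (by omega)]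
    simp
  | succ m ih =>
    intro r c hm
    rw [pvLoopA, dif_pos (by omega)]
    rw [ih (r - 1) (c + 1) (by omega)]
    rw [List.range_succ_eq_map, List.map_cons, List.map_map]
    refine congrArg₂ _ (by simp) ?_
    apply List.map_congr_left
    intro k _
    simp only [Function.comp]
    refine Prod.ext ?_ ?_ <;> push_cast <;> ring

theorem get_attack_zones_up_and_right_spec : Claim_equal_get_attack_zones_up_and_right := by
  intro n row col _
  show get_attack_zones_up_and_right n row col = get_attack_zones_up_and_right_alt n row col
  unfold get_attack_zones_up_and_right get_attack_zones_up_and_right_alt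
  rw [pvLoopA_eq_range n (min row (n - 1 - col)).toNat (row - 1) (col + 1) (by omega)]
  simp only []
  rw [← List.map_reverse]
  have hrev : (PySem.List.pyRange (max 0 (row + col - n + 1)) row 1).reverse
      = PySem.List.pyRange (row - 1) (max 0 (row + col - n + 1) - 1) (-1) := by
    rw [PySem.List.pyRange_neg_one_eq_reverse]; norm_num
  rw [hrev, PySem.List.pyRange_neg_one, List.map_map]
  have hm : ((row - 1) - (max 0 (row + col - n + 1) - 1)).toNat = (min row (n - 1 - col)).toNat := by omega
  rw [hm]
  apply List.map_congr_left
  intro k hk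
  simp only [Function.comp]
  refine Prod.ext ?_ ?_ <;> push_cast <;> ring
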